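-- pv_equiv track=rewrite | github.com/tino-koenig/forge | core/llm_integration.py | _sanitize_entity_types
-- ===== SOURCE A (Python) =====
-- def _sanitize_str_list(value: object, *, limit: int, min_len: int = 2, max_len: int = 80) -> list[str]:
--     if not isinstance(value, list):
--         return []
--     out: list[str] = []
--     seen: set[str] = set()
--     for item in value:
--         if not isinstance(item, str):
--             continue
--         candidate = " ".join(item.strip().split())
--         if len(candidate) < min_len or len(candidate) > max_len:
--             continue
--         lowered = candidate.lower()
--         if lowered in seen:
--             continue
--         seen.add(lowered)
--         out.append(candidate)
--         if len(out) >= limit: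
--             break
--     return out
--
-- def _sanitize_entity_types(value: object) -> list[str]:
--     allowed = {"file", "module", "function", "class", "variable", "api_call", "config", "command_flag"}
--     items = _sanitize_str_list(value, limit=8, min_len=2, max_len=32)
--     result: list[str] = []
--     for item in items:
--         normalized = item.strip().lower()
--         if normalized in allowed and normalized not in result:
--             result.append(normalized)
--     return result
-- ===== SOURCE B (Python) =====
-- def _sanitize_entity_types(value: object) -> list[str]:
--     # Single fused pass: count sanitized candidates (cap 8) and collect allowed ones directly.
--     if not isinstance(value, list):
--         return []
--     allowed = {"file", "module", "function", "class", "variable", "api_call", "config", "command_flag"}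
--     result: list[str] = []
--     seen: set[str] = set()
--     count = 0
--     for item in value:
--         if not isinstance(item, str):
--             continue
--         candidate = " ".join(item.strip().split())
--         if not (2 <= len(candidate) <= 32):
--             continue
--         lowered = candidate.lower()
--         if lowered in seen:
--             continue
--         seen.add(lowered)
--         count += 1
--         if lowered in allowed:
--             result.append(lowered)
--         if count >= 8:
--             break
--     return result
-- ===== Notes on version B (the rewrite author's own statement) =====
-- stated objective: simpler
-- what changed: Fuses A's two passes (sanitize to a capped intermediate list, then filter/dedupe against an allowed set) into a single loop that keeps a seen set and a sanitized-item counter and appends allowed lowercased candidates directly, never materialising the intermediate list.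
import Mathlib
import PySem

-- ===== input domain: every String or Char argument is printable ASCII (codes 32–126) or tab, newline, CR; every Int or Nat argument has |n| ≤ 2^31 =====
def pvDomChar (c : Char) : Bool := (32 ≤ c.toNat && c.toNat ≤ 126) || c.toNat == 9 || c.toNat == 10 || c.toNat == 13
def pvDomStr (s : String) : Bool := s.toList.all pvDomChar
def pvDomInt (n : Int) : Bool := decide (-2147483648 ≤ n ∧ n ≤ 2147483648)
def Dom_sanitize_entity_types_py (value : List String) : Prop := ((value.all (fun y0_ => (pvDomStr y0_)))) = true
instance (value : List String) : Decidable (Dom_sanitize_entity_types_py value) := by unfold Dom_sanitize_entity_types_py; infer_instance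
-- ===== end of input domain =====

-- B fuses A's sanitize-then-filter two-pass structure into one traversal (objective: simpler, one pass).

-- the allowed-entity-type set literal, shared verbatim by both Python sources
def pvAllowed : PySem.Set String :=
  PySem.Set.ofList ["file", "module", "function", "class", "variable", "api_call", "config", "command_flag"]

-- ===== PORT A =====
-- first pass: _sanitize_str_list(value, limit=8, min_len=2, max_len=32) (value a list of str, so the isinstance guards are identically true)
def pvLoopA (items : List String) (out : List String) (seen : PySem.Set String) : List String :=
  match items with
  | [] => out
  | item :: rest =>
    let candidate := PySem.Str.join " " (PySem.Str.split₀ (PySem.Str.strip item))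
    if PySem.Str.len candidate < 2 ∨ PySem.Str.len candidate > 32 then
      pvLoopA rest out seen
    else
      let lowered := PySem.Str.lower candidate
      if lowered ∈ seen then
        pvLoopA rest out seen
      else
        let seen' := seen.add lowered
        let out' := out ++ [candidate]
        if 8 ≤ out'.length then out' else pvLoopA rest out' seen'

-- second pass of _sanitize_entity_types: filter to allowed, dedupe against result
def pvPass2 (items : List String) : List String :=
  items.foldl
    (fun res item =>
      let normalized := PySem.Str.lower (PySem.Str.strip item)
      if normalized ∈ pvAllowed ∧ normalized ∉ res then res ++ [normalized] else res)
    []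

def sanitize_entity_types_py (value : List String) : List String :=
  pvPass2 (pvLoopA value [] ∅)

-- ===== PORT B =====
def pvLoopB (items : List String) (result : List String) (seen : PySem.Set String) (count : Nat) : List String :=
  match items with
  | [] => result
  | item :: rest =>
    let candidate := PySem.Str.join " " (PySem.Str.split₀ (PySem.Str.strip item))
    if ¬ (2 ≤ PySem.Str.len candidate ∧ PySem.Str.len candidate ≤ 32) then
      pvLoopB rest result seen count
    else
      let lowered := PySem.Str.lower candidate
      if lowered ∈ seen then
        pvLoopB rest result seen count
      else
        let seen' := seen.add lowered
        let count' := count + 1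
        let result' := if lowered ∈ pvAllowed then result ++ [lowered] else result
        if 8 ≤ count' then result' else pvLoopB rest result' seen' count'

def sanitize_entity_types_py_alt (value : List String) : List String :=
  pvLoopB value [] ∅ 0

-- ===== PRECONDITION & SPEC =====
def Spec_sanitize_entity_types_py (value : List String) (out : List String) : Prop := out = sanitize_entity_types_py_alt value
instance (value : List String) (out : List String) : Decidable (Spec_sanitize_entity_types_py value out) := by unfold Spec_sanitize_entity_types_py; infer_instance

-- ===== CLAIM (what is proved, stated in full; the proofs are below) =====
def Claim_equal_sanitize_entity_types_py : Prop := ∀ (value : List String), Dom_sanitize_entity_types_py value → Spec_sanitize_entity_types_py value (sanitize_entity_types_py value)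

-- ===== LEMMAS AND PROOFS =====

-- every word produced by split₀ is nonempty and free of whitespace characters
lemma pv_go_prop (s cur : List Char) (acc : List (List Char)) (hcur : ∀ c ∈ cur, PySem.Chars.isspace c = false)
    (hacc : ∀ w ∈ acc, w ≠ [] ∧ ∀ c ∈ w, PySem.Chars.isspace c = false) :
    ∀ w ∈ PySem.Chars.split₀.go s cur acc, w ≠ [] ∧ ∀ c ∈ w, PySem.Chars.isspace c = false := by
  induction s generalizing cur acc with
  | nil =>
    intro w hw
    unfold PySem.Chars.split₀.go at hw
    by_cases hcurE : cur.isEmpty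
    · simp [hcurE] at hw; exact hacc w hw
    · simp [hcurE] at hw
      rcases hw with hw | hw
      · exact hacc w hw
      · subst hw
        refine ⟨by simpa using (by simpa [List.isEmpty_iff] using hcurE : cur ≠ []), ?_⟩
        intro c hc; exact hcur c (by simpa using hc)
  | cons a rest ih =>
    intro w hw
    unfold PySem.Chars.split₀.go at hw
    by_cases hsp : PySem.Chars.isspace a
    · by_cases hcurE : cur.isEmpty
      · simp [hsp, hcurE] at hw
        exact ih [] acc (by simp) hacc w hw
      · simp [hsp, hcurE] at hw
        refine ih [] (cur.reverse :: acc) (by simp) ?_ w hw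
        intro v hv
        rcases List.mem_cons.mp hv with hv | hv
        · subst hv
          refine ⟨by simpa using (by simpa [List.isEmpty_iff] using hcurE : cur ≠ []), ?_⟩
          intro c hc; exact hcur c (by simpa using hc)
        · exact hacc v hv
    · simp [hsp] at hw
      refine ih (a :: cur) acc ?_ hacc w hw
      intro c hc
      rcases List.mem_cons.mp hc with hc | hc
      · subst hc; simpa using hsp
      · exact hcur c hc

lemma pv_split₀_prop (s : List Char) :
    ∀ w ∈ PySem.Chars.split₀ s, w ≠ [] ∧ ∀ c ∈ w, PySem.Chars.isspace c = false := by
  unfold PySem.Chars.split₀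
  exact pv_go_prop s [] [] (by simp) (by simp)

lemma pv_join_head?_eq (w : List Char) (ws : List (List Char)) (hw : w ≠ []) :
    (PySem.Chars.join [' '] (w :: ws)).head? = w.head? := by
  cases ws with
  | nil => simp [PySem.Chars.join_singleton]
  | cons v vs =>
    rw [PySem.Chars.join_cons_cons]
    cases w with
    | nil => exact absurd rfl hw
    | cons a as => simp

lemma pv_join_ne_nil (w : List Char) (ws : List (List Char)) (hw : w ≠ []) :
    PySem.Chars.join [' '] (w :: ws) ≠ [] := by
  intro h
  have := pv_join_head?_eq w ws hw
  rw [h] at this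
  cases w with
  | nil => exact hw rfl
  | cons a as => simp at this

-- head and last of " ".join(words) are non-space when each word is nonempty and space-free
lemma pv_join_head (words : List (List Char))
    (h : ∀ w ∈ words, w ≠ [] ∧ ∀ c ∈ w, PySem.Chars.isspace c = false) :
    ∀ c, (PySem.Chars.join [' '] words).head? = some c → PySem.Chars.isspace c = false := by
  cases words with
  | nil => simp [PySem.Chars.join_nil]
  | cons w ws =>
    intro c hc
    have hw := h w (by simp)
    rw [pv_join_head?_eq w ws hw.1] at hc
    exact hw.2 c (List.mem_of_mem_head? hc)

lemma pv_join_last (words : List (List Char))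
    (h : ∀ w ∈ words, w ≠ [] ∧ ∀ c ∈ w, PySem.Chars.isspace c = false) :
    ∀ c, (PySem.Chars.join [' '] words).getLast? = some c → PySem.Chars.isspace c = false := by
  induction words with
  | nil => simp [PySem.Chars.join_nil]
  | cons w ws ih =>
    intro c hc
    cases ws with
    | nil =>
      rw [PySem.Chars.join_singleton] at hc
      exact (h w (by simp)).2 c (List.mem_of_mem_getLast? hc)
    | cons v vs =>
      rw [PySem.Chars.join_cons_cons] at hc
      have hvne : PySem.Chars.join [' '] (v :: vs) ≠ [] :=
        pv_join_ne_nil v vs (h v (by simp)).1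
      obtain ⟨d, hd⟩ := Option.isSome_iff_exists.mp
        (by simpa [List.getLast?_isSome] using hvne :
          (PySem.Chars.join [' '] (v :: vs)).getLast?.isSome)
      rw [List.getLast?_append, hd] at hc
      simp at hc
      subst hc
      exact ih (fun u hu => h u (by simp [hu])) d hd

lemma pv_strip_id (l : List Char)
    (hhead : ∀ c, l.head? = some c → PySem.Chars.isspace c = false)
    (hlast : ∀ c, l.getLast? = some c → PySem.Chars.isspace c = false) :
    PySem.Chars.strip l = l := by
  unfold PySem.Chars.strip PySem.Chars.lstrip PySem.Chars.rstrip
  have h1 : List.dropWhile PySem.Chars.isspace l = l := by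
    rw [List.dropWhile_eq_self_iff]
    intro hlen
    have h0 : l.head? = some l[0] := by
      rw [List.head?_eq_getElem?, List.getElem?_eq_getElem hlen]
    simpa using hhead _ h0
  rw [h1]
  have h2 : List.dropWhile PySem.Chars.isspace l.reverse = l.reverse := by
    rw [List.dropWhile_eq_self_iff]
    intro hlen
    have h0 : l.reverse.head? = some l.reverse[0] := by
      rw [List.head?_eq_getElem?, List.getElem?_eq_getElem hlen]
    rw [List.head?_reverse] at h0
    simpa using hlast _ h0
  rw [h2, List.reverse_reverse]

-- strip is the identity on " ".join(split()) output
lemma pv_strip_join (s : List Char) :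
    PySem.Chars.strip (PySem.Chars.join [' '] (PySem.Chars.split₀ s))
      = PySem.Chars.join [' '] (PySem.Chars.split₀ s) :=
  pv_strip_id _ (pv_join_head _ (pv_split₀_prop s)) (pv_join_last _ (pv_split₀_prop s))

-- the collapsed candidate is strip-fixed, so pass 2's strip().lower() is just lower
lemma pv_strip_candidate (item : String) :
    PySem.Str.strip (PySem.Str.join " " (PySem.Str.split₀ (PySem.Str.strip item)))
      = PySem.Str.join " " (PySem.Str.split₀ (PySem.Str.strip item)) := by
  apply String.toList_injective
  rw [PySem.Str.toList_strip, PySem.Str.toList_join, PySem.Str.split₀_map_toList,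
    PySem.Str.toList_strip]
  exact pv_strip_join _

-- pass 2 is a foldl, so it peels one appended element
lemma pv_pass2_append (out : List String) (c : String) :
    pvPass2 (out ++ [c]) =
      (let normalized := PySem.Str.lower (PySem.Str.strip c)
       if normalized ∈ pvAllowed ∧ normalized ∉ pvPass2 out then pvPass2 out ++ [normalized]
       else pvPass2 out) := by
  unfold pvPass2
  rw [List.foldl_append]
  simp only [List.foldl_cons, List.foldl_nil]

-- fusion invariant: running A's filter pass after A's sanitize loop equals B's fused loop,
-- provided everything already in the filtered accumulator is recorded in seen
lemma pv_main (items : List String) (out : List String) (seen : PySem.Set String)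
    (hsub : ∀ l ∈ pvPass2 out, l ∈ seen) :
    pvPass2 (pvLoopA items out seen) = pvLoopB items (pvPass2 out) seen out.length := by
  induction items generalizing out seen with
  | nil => simp [pvLoopA, pvLoopB]
  | cons item rest ih =>
    simp only [pvLoopA, pvLoopB]
    set c := PySem.Str.join " " (PySem.Str.split₀ (PySem.Str.strip item)) with hc
    by_cases hl : PySem.Str.len c < 2 ∨ PySem.Str.len c > 32
    · have hl' : ¬ (2 ≤ PySem.Str.len c ∧ PySem.Str.len c ≤ 32) := by omega
      rw [if_pos hl, if_pos hl']
      exact ih out seen hsub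
    · rw [if_neg hl, if_neg (by omega : ¬ ¬ (2 ≤ PySem.Str.len c ∧ PySem.Str.len c ≤ 32))]
      set lo := PySem.Str.lower c with hlo
      by_cases hseen : lo ∈ seen
      · rw [if_pos hseen, if_pos hseen]
        exact ih out seen hsub
      · rw [if_neg hseen, if_neg hseen]
        have hres : pvPass2 (out ++ [c]) =
            (if lo ∈ pvAllowed then pvPass2 out ++ [lo] else pvPass2 out) := by
          rw [pv_pass2_append]
          have hnorm : PySem.Str.lower (PySem.Str.strip c) = lo := by
            rw [hc, pv_strip_candidate]
          have hnotin : lo ∉ pvPass2 out := fun hmem => hseen (hsub lo hmem)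
          simp only [hnorm]
          by_cases hall : lo ∈ pvAllowed
          · rw [if_pos ⟨hall, hnotin⟩, if_pos hall]
          · rw [if_neg (fun h => hall h.1), if_neg hall]
        have hlenout : (out ++ [c]).length = out.length + 1 := by simp
        by_cases hcap : 8 ≤ out.length + 1
        · rw [if_pos (by simpa [hlenout] using hcap), if_pos hcap]
          exact hres
        · rw [if_neg (by simpa [hlenout] using hcap), if_neg hcap]
          have hsub' : ∀ l ∈ pvPass2 (out ++ [c]), l ∈ seen.add lo := by
            intro l hlmem
            rw [hres] at hlmem
            rw [PySem.Set.mem_add]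
            by_cases hall : lo ∈ pvAllowed
            · rw [if_pos hall] at hlmem
              rcases List.mem_append.mp hlmem with h | h
              · exact Or.inl (hsub l h)
              · exact Or.inr (by simpa using h)
            · rw [if_neg hall] at hlmem
              exact Or.inl (hsub l hlmem)
          rw [ih (out ++ [c]) (seen.add lo) hsub', hres, hlenout]

-- ===== VERDICT (by name: the statement is the Claim_ definition above) =====
theorem sanitize_entity_types_py_spec : Claim_equal_sanitize_entity_types_py := by
  intro value _
  unfold Spec_sanitize_entity_types_py sanitize_entity_types_py sanitize_entity_types_py_alt
  have h := pv_main value [] ∅ (by simp [pvPass2])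
  simpa [pvPass2] using h
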